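-- pv_equiv track=rewrite | github.com/wcauchois/aoc2017 | day6/main.py | step
-- ===== SOURCE A (Python) =====
-- def step(banks):
--   new_banks = banks[:]
--   (idx, max_blocks) = max(enumerate(new_banks), key=lambda x: (x[1], -x[0]))
--   new_banks[idx] = 0
--   counter = max_blocks
--   cur_idx = (idx + 1) % len(new_banks)
--   while counter > 0:
--     new_banks[cur_idx] += 1
--     counter -= 1
--     cur_idx = (cur_idx + 1) % len(new_banks)
--   return new_banks
-- ===== SOURCE B (Python) =====
-- def step(banks):
--   n = len(banks)
--   m = max(banks)
--   idx = banks.index(m)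
--   if m > 0:
--     q, r = divmod(m, n)
--   else:
--     q, r = 0, 0
--   return [(0 if i == idx else banks[i]) + q + (1 if (i - idx - 1) % n < r else 0)
--           for i in range(n)]
-- ===== Notes on version B (the rewrite author's own statement) =====
-- stated objective: faster
-- what changed: Replaces the one-block-at-a-time redistribution loop (max_blocks iterations) with a closed-form quotient/remainder formula: every bank gets q = m//n extra blocks and the first r = m%n banks after the maximum bank get one more, built in a single comprehension over the indices.
import Mathlib
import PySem

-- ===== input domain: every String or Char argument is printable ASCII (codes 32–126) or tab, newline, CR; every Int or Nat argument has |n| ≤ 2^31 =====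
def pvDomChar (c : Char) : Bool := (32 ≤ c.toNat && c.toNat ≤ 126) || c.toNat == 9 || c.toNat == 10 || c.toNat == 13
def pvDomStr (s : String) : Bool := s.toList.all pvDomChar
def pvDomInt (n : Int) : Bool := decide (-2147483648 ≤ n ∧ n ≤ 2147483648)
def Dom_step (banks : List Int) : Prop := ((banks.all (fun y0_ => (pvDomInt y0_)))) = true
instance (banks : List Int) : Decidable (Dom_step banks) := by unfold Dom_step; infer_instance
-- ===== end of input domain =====

-- B replaces A's one-block-at-a-time redistribution loop (max_blocks iterations) by a
-- closed-form quotient/remainder distribution computed in one pass over the indices.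

-- ===== PORT A =====
-- the 'while counter > 0' loop of A, step for step
def stepLoop (nb : List Int) (counter : Int) (cur_idx : Int) : List Int :=
  if counter > 0 then
    stepLoop (PySem.List.pySetD nb cur_idx (PySem.List.pyGetD nb cur_idx 0 + 1))
      (counter - 1) (PySem.Int.mod (cur_idx + 1) (PySem.List.pySetD nb cur_idx (PySem.List.pyGetD nb cur_idx 0 + 1)).length)
  else nb
termination_by counter.toNat
decreasing_by omega

def step (banks : List Int) : List Int :=
  let new_banks := banks
  match PySem.List.max2? (PySem.List.enumerate new_banks 0) (fun x => x.2) (fun x => -x.1) with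
  | none => []   -- unreachable: Python A raises ValueError on [], excluded by Pre_step
  | some im =>
    let idx := im.1
    let max_blocks := im.2
    let new_banks := PySem.List.pySetD new_banks idx 0
    stepLoop new_banks max_blocks (PySem.Int.mod (idx + 1) new_banks.length)

-- ===== PORT B =====
def step_alt (banks : List Int) : List Int :=
  let n : Int := banks.length
  match PySem.List.max? banks (fun y => y) with
  | none => []   -- unreachable: Python B raises ValueError on [], excluded by Pre_step
  | some m =>
    let idx : Int := ((PySem.List.index? banks m).getD 0 : Nat)
    let qr : Int × Int := if m > 0 then (PySem.Int.floordiv m n, PySem.Int.mod m n) else (0, 0)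
    (PySem.List.pyRange 0 n 1).map (fun i =>
      (if i = idx then 0 else PySem.List.pyGetD banks i 0) + qr.1 +
      (if PySem.Int.mod (i - idx - 1) n < qr.2 then 1 else 0))

-- ===== PRECONDITION & SPEC =====
-- Pre_ excludes only the empty list, on which Python's max() raises ValueError (in both A and B).
def Pre_step (banks : List Int) : Prop := banks ≠ []
instance (banks : List Int) : Decidable (Pre_step banks) := by unfold Pre_step; infer_instance
def pvWitness_step : List Int := [0, 2, 7, 0]

def Spec_step (banks : List Int) (out : List Int) : Prop := out = step_alt banks
instance (banks : List Int) (out : List Int) : Decidable (Spec_step banks out) := by unfold Spec_step; infer_instance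

-- ===== CLAIM (what is proved, stated in full; the proofs are below) =====
def Claim_equal_step : Prop := ∀ (banks : List Int), Dom_step banks → Pre_step banks → Spec_step banks (step banks)

-- ===== LEMMAS AND PROOFS =====

-- fold function of A's max(..., key=lambda x: (x[1], -x[0])), specialized from PySem.List.max2?
def amF (acc : Option (Int × Int)) (x : Int × Int) : Option (Int × Int) :=
  match acc with
  | none => some x
  | some m => if (decide (m.2 < x.2) || !decide (x.2 < m.2) && decide (-m.1 < -x.1)) = true
              then some x else some m

theorem max2?_eq_foldl_amF (xs : List (Int × Int)) :
    PySem.List.max2? xs (fun p => p.2) (fun p => -p.1) = List.foldl amF none xs := by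
  unfold PySem.List.max2? amF
  congr 1
  funext acc x
  cases acc <;> rfl

theorem fold_inv (xs : List Int) : ∀ (s j m : Int), j < s →
    List.foldl amF (some (j, m)) (PySem.List.enumerate xs s)
      = some (if m < xs.foldl max m
              then (s + ↑(xs.idxOf (xs.foldl max m)), xs.foldl max m)
              else (j, m)) := by
  induction xs with
  | nil => intro s j m _; simp [PySem.List.enumerate]
  | cons x xs ih =>
    intro s j m hjs
    rw [PySem.List.enumerate_cons, List.foldl_cons]
    have hstep : amF (some (j, m)) (s, x) = if m < x then some (s, x) else some (j, m) := by
      simp only [amF]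
      split_ifs with h1 h2 h2 <;> simp_all <;> omega
    by_cases hmx : m < x
    · rw [hstep, if_pos hmx, ih (s+1) s x (by omega)]
      have hx := (PySem.List.le_foldl_max xs x).1
      by_cases hF : x < xs.foldl max x
      · rw [if_pos hF, List.foldl_cons, max_eq_right hmx.le]
        rw [if_pos (by omega : m < xs.foldl max x)]
        rw [List.idxOf_cons_ne xs (by omega : x ≠ xs.foldl max x)]
        simp; ring
      · have hxm : xs.foldl max x = x := le_antisymm (by omega) hx
        rw [if_neg hF, List.foldl_cons, max_eq_right hmx.le, hxm,
          if_pos hmx, List.idxOf_cons_self]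
        simp
    · rw [hstep, if_neg hmx, ih (s+1) j m (by omega), List.foldl_cons,
        max_eq_left (by omega : x ≤ m)]
      by_cases hF : m < xs.foldl max m
      · rw [if_pos hF, if_pos hF,
          List.idxOf_cons_ne xs (by omega : x ≠ xs.foldl max m)]
        simp; ring
      · rw [if_neg hF, if_neg hF]

theorem argmaxA (x : Int) (xs : List Int) :
    PySem.List.max2? (PySem.List.enumerate (x :: xs) 0) (fun p => p.2) (fun p => -p.1)
      = some (((x :: xs).idxOf (xs.foldl max x) : Int), xs.foldl max x) := by
  rw [max2?_eq_foldl_amF, PySem.List.enumerate_cons, List.foldl_cons,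
    show amF none (0, x) = some (0, x) from rfl,
    show (0:Int)+1 = 1 from rfl, fold_inv xs 1 0 x (by omega)]
  have hx := (PySem.List.le_foldl_max xs x).1
  by_cases hF : x < xs.foldl max x
  · rw [if_pos hF, List.idxOf_cons_ne xs (by omega : x ≠ xs.foldl max x)]
    simp; ring
  · have hxm : xs.foldl max x = x := le_antisymm (by omega) hx
    rw [if_neg hF, hxm, List.idxOf_cons_self]
    simp

theorem emod_small (a n : Int) (h1 : -n ≤ a) (h2 : a < n) :
    a % n = if 0 ≤ a then a else a + n := by
  split_ifs with h
  · exact Int.emod_eq_of_lt h h2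
  · have h3 : (a + n * 1) % n = a % n := Int.add_mul_emod_self_left a n 1
    rw [← h3, mul_one]
    exact Int.emod_eq_of_lt (by omega) (by omega)

theorem emod_sub_emod (a b n : Int) : (a - b % n) % n = (a - b) % n := by
  conv_rhs => rw [Int.sub_emod]
  rw [Int.sub_emod a (b % n), Int.emod_emod_of_dvd _ dvd_rfl]

-- closed-form count of how many of the first c cyclic steps starting at cur land on index i
def cnt (c cur : Int) (i : Nat) (n : Int) : Int :=
  if 0 < c then c / n + (if (↑i - cur) % n < c % n then 1 else 0) else 0

theorem cntStep (c cur : Int) (i : Nat) (n : Int) (hn : 0 < n) (hc0 : 0 ≤ cur)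
    (hcn : cur < n) (hi : (i : Int) < n) (hc : 0 < c) :
    cnt c cur i n = (if (i : Int) = cur then 1 else 0) + cnt (c - 1) ((cur + 1) % n) i n := by
  have hrb1 : 0 ≤ c % n := Int.emod_nonneg c (by omega)
  have hrb2 : c % n < n := Int.emod_lt_of_pos c hn
  have hqr : n * (c / n) + c % n = c := Int.mul_ediv_add_emod c n
  have hcur' : (cur + 1) % n = if cur + 1 < n then cur + 1 else 0 := by
    split_ifs with h
    · exact Int.emod_eq_of_lt (by omega) h
    · have : cur + 1 = n := by omega
      rw [this, Int.emod_self]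
  rw [hcur']
  have hcvb1 : 0 ≤ (if cur + 1 < n then cur + 1 else 0) := by split_ifs <;> omega
  have hcvb2 : (if cur + 1 < n then cur + 1 else 0) < n := by split_ifs <;> omega
  have hoff : ((i : Int) - cur) % n = if cur ≤ (i:Int) then (i:Int) - cur else (i:Int) - cur + n := by
    rw [emod_small _ n (by omega) (by omega)]; split_ifs <;> omega
  have hoff2 : ((i : Int) - (if cur + 1 < n then cur + 1 else 0)) % n =
      if (if cur + 1 < n then cur + 1 else 0) ≤ (i:Int)
      then (i:Int) - (if cur + 1 < n then cur + 1 else 0)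
      else (i:Int) - (if cur + 1 < n then cur + 1 else 0) + n := by
    rw [emod_small _ n (by omega) (by omega)]
    split_ifs <;> omega
  by_cases hc1 : 0 < c - 1
  · have hrq2 : ((c-1) / n = if 0 < c % n then c / n else c / n - 1) ∧
        ((c-1) % n = if 0 < c % n then c % n - 1 else n - 1) := by
      split_ifs with h
      · exact (Int.ediv_emod_unique hn).2 ⟨by omega, by omega, by omega⟩
      · refine (Int.ediv_emod_unique hn).2 ⟨?_, by omega, by omega⟩
        have : n * (c / n - 1) = n * (c / n) - n := by ring
        omega
    simp only [cnt, if_pos hc, if_pos hc1, hrq2.1, hrq2.2, hoff, hoff2]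
    split_ifs <;> omega
  · have hce : c = 1 := by omega
    have h1n : ((1:Int) / n = if n = 1 then 1 else 0) ∧ ((1:Int) % n = if n = 1 then 0 else 1) := by
      split_ifs with h
      · subst h; exact ⟨rfl, rfl⟩
      · exact (Int.ediv_emod_unique hn).2 ⟨by omega, by omega, by omega⟩
    simp only [cnt, hce, h1n.1, h1n.2, hoff]
    split_ifs <;> omega

theorem loopChar (k : Nat) : ∀ (nb : List Int) (cur : Int), 0 < nb.length →
    0 ≤ cur → cur < ↑nb.length →
    (stepLoop nb ↑k cur).length = nb.length ∧
    ∀ i : Nat, i < nb.length →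
      (stepLoop nb ↑k cur)[i]? = some (nb.getD i 0 + cnt ↑k cur i ↑nb.length) := by
  induction k with
  | zero =>
    intro nb cur hn h0 h1
    rw [stepLoop, if_neg (by omega)]
    refine ⟨rfl, fun i hi => ?_⟩
    simp [cnt, List.getElem?_eq_getElem hi]
  | succ k ih =>
    intro nb cur hn h0 h1
    rw [stepLoop, if_pos (by exact_mod_cast Nat.cast_pos.mpr (Nat.succ_pos k))]
    have hset : PySem.List.pySetD nb cur (PySem.List.pyGetD nb cur 0 + 1)
        = nb.set cur.toNat (nb.getD cur.toNat 0 + 1) := by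
      rw [PySem.List.pyGetD_of_nonneg nb 0 h0, PySem.List.pySetD_of_nonneg nb _ h0]
    have hlen : (nb.set cur.toNat (nb.getD cur.toNat 0 + 1)).length = nb.length :=
      List.length_set ..
    rw [hset, hlen]
    have hmod : PySem.Int.mod (cur + 1) ↑nb.length = (cur + 1) % ↑nb.length :=
      PySem.Int.mod_eq_emod_of_pos (by exact_mod_cast hn)
    rw [hmod]
    have hk1 : (↑(k + 1) : Int) - 1 = ↑k := by push_cast; ring
    rw [hk1]
    have hb1 : 0 ≤ (cur + 1) % ↑nb.length := Int.emod_nonneg _ (by omega)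
    have hb2 : (cur + 1) % ↑nb.length < ↑nb.length := Int.emod_lt_of_pos _ (by exact_mod_cast hn)
    obtain ⟨ihl, ihe⟩ := ih (nb.set cur.toNat (nb.getD cur.toNat 0 + 1)) ((cur + 1) % ↑nb.length)
      (by rw [hlen] at *; exact hn) hb1 (by rw [hlen]; exact hb2)
    rw [hlen] at ihl ihe
    refine ⟨ihl, fun i hi => ?_⟩
    rw [ihe i hi]
    have hgd : (nb.set cur.toNat (nb.getD cur.toNat 0 + 1)).getD i 0
        = (if (i : Int) = cur then 1 else 0) + nb.getD i 0 := by
      have hcnat : cur.toNat < nb.length := by omega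
      rw [List.getD_eq_getElem nb 0 hcnat,
        List.getD_eq_getElem _ 0 (by simpa using hi), List.getElem_set,
        List.getD_eq_getElem nb 0 hi]
      split_ifs with hic hic2 hic2
      · subst hic; omega
      · omega
      · omega
      · ring
    rw [hgd, cntStep (↑(k+1)) cur i ↑nb.length (by exact_mod_cast hn) h0 h1
        (by exact_mod_cast hi) (by positivity), hk1]
    congr 1
    ring

theorem idxOf?_getD (a : Int) (l : List Int) (h : a ∈ l) : (l.idxOf? a).getD 0 = l.idxOf a := by
  induction l with
  | nil => simp at h
  | cons x xs ih =>
    by_cases hx : x = a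
    · subst hx
      simp [List.idxOf?_cons, List.idxOf_cons_self]
    · have hmem : a ∈ xs := by
        rcases List.mem_cons.mp h with h1 | h1
        · exact absurd h1.symm hx
        · exact h1
      rw [List.idxOf?_cons, List.idxOf_cons_ne xs hx]
      simp only [beq_iff_eq, if_neg hx]
      rw [← ih hmem]
      rcases h2 : List.idxOf? a xs with _ | k
      · rw [List.idxOf?_eq_none_iff] at h2; exact absurd hmem h2
      · simp

theorem step_eq (x : Int) (xs : List Int) : step (x :: xs) = step_alt (x :: xs) := by
  have hn : 0 < (x :: xs).length := by simp
  have hFmem : xs.foldl max x ∈ x :: xs := PySem.List.max?_mem (PySem.List.max?_id_cons x xs)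
  have hjlt : (x :: xs).idxOf (xs.foldl max x) < (x :: xs).length :=
    List.idxOf_lt_length_of_mem hFmem
  simp only [step, step_alt]
  rw [argmaxA, PySem.List.max?_id_cons]
  simp only [PySem.List.index?_eq_idxOf?, idxOf?_getD _ _ hFmem]
  have hset : PySem.List.pySetD (x :: xs) (↑(List.idxOf (List.foldl max x xs) (x :: xs))) 0
      = (x :: xs).set ((x :: xs).idxOf (xs.foldl max x)) 0 := by
    rw [PySem.List.pySetD_of_nonneg _ _ (by positivity)]
    simp
  rw [hset]
  have hlens : ((x :: xs).set ((x :: xs).idxOf (xs.foldl max x)) 0).length = (x :: xs).length :=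
    List.length_set ..
  rw [hlens]
  rw [PySem.Int.mod_eq_emod_of_pos (b := ((x :: xs).length : Int)) (by exact_mod_cast hn)]
  have hb1 : (0:Int) ≤ ((((x :: xs).idxOf (xs.foldl max x)) : Int) + 1) % (((x :: xs).length : Int)) :=
    Int.emod_nonneg _ (show ((x :: xs).length : Int) ≠ 0 by exact_mod_cast hn.ne')
  have hb2 : ((((x :: xs).idxOf (xs.foldl max x)) : Int) + 1) % (((x :: xs).length : Int)) < (((x :: xs).length : Int)) :=
    Int.emod_lt_of_pos _ (by exact_mod_cast hn)
  by_cases hFpos : 0 < xs.foldl max x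
  · -- max_blocks > 0: characterize the loop and compare index by index
    have hk : ((xs.foldl max x).toNat : Int) = xs.foldl max x := Int.toNat_of_nonneg hFpos.le
    obtain ⟨hlenA, helemA⟩ := loopChar (xs.foldl max x).toNat
      ((x :: xs).set ((x :: xs).idxOf (xs.foldl max x)) 0)
      (((((x :: xs).idxOf (xs.foldl max x)) : Int) + 1) % (((x :: xs).length : Int)))
      (by simp) hb1 (by rw [hlens]; exact hb2)
    rw [hlens] at hlenA helemA
    rw [hk] at hlenA helemA
    simp only [gt_iff_lt, if_pos hFpos]
    apply List.ext_getElem?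
    intro i
    by_cases hi : i < (x :: xs).length
    · rw [helemA i hi, PySem.List.getElem?_map_pyRange_zero _ (x :: xs).length i hi]
      congr 1
      have hgd : ((x :: xs).set ((x :: xs).idxOf (xs.foldl max x)) 0).getD i 0
          = if (i : Int) = (((x :: xs).idxOf (xs.foldl max x) : Nat) : Int) then 0
            else (x :: xs).getD i 0 := by
        rw [List.getD_eq_getElem _ 0 (by simpa using hi), List.getElem_set,
          List.getD_eq_getElem _ 0 hi]
        split_ifs with h1 h2 h2 <;> first | rfl | omega
      rw [hgd, PySem.List.pyGetD_natCast,
        PySem.Int.floordiv_eq_ediv_of_pos (by exact_mod_cast hn),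
        PySem.Int.mod_eq_emod_of_pos (by exact_mod_cast hn),
        PySem.Int.mod_eq_emod_of_pos (by exact_mod_cast hn)]
      simp only [cnt, if_pos (show (0:Int) < xs.foldl max x from hFpos)]
      have hcur : ((i:Int) - ((((x :: xs).idxOf (xs.foldl max x)) : Int) + 1) % ((x :: xs).length : Int)) % ((x :: xs).length : Int)
          = ((i:Int) - (((x :: xs).idxOf (xs.foldl max x)) : Int) - 1) % ((x :: xs).length : Int) := by
        rw [emod_sub_emod]
        congr 1
        ring
      rw [hcur]
      split_ifs <;> omega
    · refine Eq.trans (List.getElem?_eq_none ?_) (Eq.symm (List.getElem?_eq_none ?_))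
      · rw [hlenA]; omega
      · rw [List.length_map, PySem.List.length_pyRange_one]; omega
  · -- max_blocks ≤ 0: the while loop runs zero times
    rw [stepLoop, if_neg (by omega)]
    simp only [gt_iff_lt, if_neg hFpos]
    apply List.ext_getElem?
    intro i
    by_cases hi : i < (x :: xs).length
    · rw [List.getElem?_eq_getElem (by simpa using hi),
        PySem.List.getElem?_map_pyRange_zero _ (x :: xs).length i hi]
      congr 1
      dsimp only
      have hmn : 0 ≤ PySem.Int.mod ((i:Int) - (((x :: xs).idxOf (xs.foldl max x)) : Int) - 1)
          ((x :: xs).length : Int) := PySem.Int.mod_nonneg _ (by exact_mod_cast hn)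
      have hite2 : (if PySem.Int.mod ((i:Int) - (((x :: xs).idxOf (xs.foldl max x) : Nat) : Int) - 1)
          ((x :: xs).length : Int) < (0:Int) then (1:Int) else 0) = 0 := if_neg (by omega)
      rw [hite2, PySem.List.pyGetD_natCast, List.getElem_set,
        List.getD_eq_getElem _ 0 hi]
      split_ifs with h1 h2 h2 <;> omega
    · refine Eq.trans (List.getElem?_eq_none ?_) (Eq.symm (List.getElem?_eq_none ?_))
      · rw [List.length_set]; omega
      · rw [List.length_map, PySem.List.length_pyRange_one]; omega

-- ===== VERDICT (by name: the statement is the Claim_ definition above) =====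
theorem step_spec : Claim_equal_step := by
  intro banks _ hpre
  unfold Spec_step
  match banks, hpre with
  | x :: xs, _ => exact step_eq x xs
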